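-- pv_equiv track=rewrite | github.com/joycao1/splash-hyena | carrots.py | filter_universal
-- ===== SOURCE A (Python) =====
-- from collections import defaultdict
-- from typing import Iterable, Tuple, Dict, List, Optional
--
-- def filter_universal(counts: Dict[Tuple[str, str, str], int]) -> Dict[Tuple[str, str, str], int]:
--     """
--     Remove rows where (cbc, target) appears in ALL anchors for that cbc
--     (only when CBC has >1 anchors).
--     """
--     anchors_by_cbc = defaultdict(set)
--     targ_anchors = defaultdict(lambda: defaultdict(set))  # cbc -> target -> set(anchors)
--
--     for (cbc, anchor, target), _c in counts.items():
--         anchors_by_cbc[cbc].add(anchor)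
--         targ_anchors[cbc][target].add(anchor)
--
--     filtered = {}
--     for (cbc, anchor, target), c in counts.items():
--         n_anchors = len(anchors_by_cbc[cbc])
--         if n_anchors > 1 and len(targ_anchors[cbc][target]) == n_anchors:
--             continue
--         filtered[(cbc, anchor, target)] = c
--     return filtered
-- ===== SOURCE B (Python) =====
-- def filter_universal(counts):
--     """
--     Remove rows where (cbc, target) appears in ALL anchors for that cbc
--     (only when CBC has >1 anchors).
--     """
--     anchors = {}
--     for (cbc, anchor, _target) in counts:
--         anchors[cbc] = anchors.get(cbc, set()) | {anchor}
--     return {key: c for key, c in counts.items()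
--             if not (len(anchors[key[0]]) > 1
--                     and all((key[0], a, key[2]) in counts for a in anchors[key[0]]))}
-- ===== Notes on version B (the rewrite author's own statement) =====
-- stated objective: alternative
-- what changed: B drops the nested targ_anchors (cbc -> target -> set(anchors)) map entirely: it builds only anchors-by-cbc and decides each row by testing whether every anchor of its cbc occurs with its target as a key of the input dict, instead of A's set-size comparison.
import Mathlib
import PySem

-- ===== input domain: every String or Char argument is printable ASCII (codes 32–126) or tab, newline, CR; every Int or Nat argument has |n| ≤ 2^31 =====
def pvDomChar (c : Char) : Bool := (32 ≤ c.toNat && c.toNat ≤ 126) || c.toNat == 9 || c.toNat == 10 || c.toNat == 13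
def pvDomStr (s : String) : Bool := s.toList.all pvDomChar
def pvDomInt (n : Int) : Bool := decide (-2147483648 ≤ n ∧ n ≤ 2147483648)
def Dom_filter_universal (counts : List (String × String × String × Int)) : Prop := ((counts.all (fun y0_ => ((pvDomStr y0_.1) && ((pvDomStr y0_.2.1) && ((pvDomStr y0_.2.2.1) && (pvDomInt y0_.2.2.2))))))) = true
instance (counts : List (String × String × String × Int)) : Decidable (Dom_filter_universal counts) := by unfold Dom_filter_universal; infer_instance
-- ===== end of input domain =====

-- B replaces A's per-row anchor-set-size comparison (via the nested targ_anchors map) by a direct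
-- "every anchor of this cbc also carries this target" membership test against the input dict —
-- an alternative decomposition of the same cost; equivalence is about the RETURN value.

-- ===== PORT A =====
-- one pass filling anchors_by_cbc (defaultdict(set)) and targ_anchors
-- (defaultdict(lambda: defaultdict(set))); 'defaultdict[k].add(x)' is Dict.modify with default.
def pvBuildMaps (counts : List (String × String × String × Int)) :
    PySem.Dict String (PySem.Set String) × PySem.Dict String (PySem.Dict String (PySem.Set String)) :=
  counts.foldl
    (fun st r =>
      (st.1.modify r.1 [] (fun s => PySem.Set.add s r.2.1),
       st.2.modify r.1 PySem.Dict.empty (fun m => m.modify r.2.2.1 [] (fun s => PySem.Set.add s r.2.1))))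
    (PySem.Dict.empty, PySem.Dict.empty)

def filter_universal (counts : List (String × String × String × Int)) :
    List (String × String × String × Int) :=
  let st := pvBuildMaps counts
  let filtered : PySem.Dict (String × String × String) Int :=
    counts.foldl
      (fun acc r =>
        let n := PySem.Set.len (st.1.getD r.1 [])
        if 1 < n ∧ PySem.Set.len ((st.2.getD r.1 PySem.Dict.empty).getD r.2.2.1 []) = n then acc
        else acc.insert (r.1, r.2.1, r.2.2.1) r.2.2.2)
      PySem.Dict.empty
  filtered.items.map (fun p => (p.1.1, p.1.2.1, p.1.2.2, p.2))

-- ===== PORT B =====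
-- anchors[cbc] = anchors.get(cbc, set()) | {anchor}
def pvAnchors (counts : List (String × String × String × Int)) :
    PySem.Dict String (PySem.Set String) :=
  counts.foldl (fun d r => d.insert r.1 (PySem.Set.union (d.getD r.1 []) [r.2.1])) PySem.Dict.empty

def filter_universal_alt (counts : List (String × String × String × Int)) :
    List (String × String × String × Int) :=
  let anchors := pvAnchors counts
  -- dict comprehension over counts.items(); key triples are distinct under Pre_, so it is the kept-row list
  counts.filter (fun r =>
    !(decide (1 < PySem.Set.len (anchors.getD r.1 [])) &&
      (anchors.getD r.1 []).all (fun a =>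
        counts.any (fun q => (q.1, q.2.1, q.2.2.1) == (r.1, a, r.2.2.1)))))

-- ===== PRECONDITION & SPEC =====
-- Pre_ excludes lists whose (cbc, anchor, target) key triple repeats: the list encodes the Python
-- dict argument, and a duplicate key has no canonical list encoding (Python collapses it — last
-- value at first position — before A ever runs), so such lists do not represent a distinct input.
def Pre_filter_universal (counts : List (String × String × String × Int)) : Prop :=
  (counts.map (fun r => (r.1, r.2.1, r.2.2.1))).Nodup
instance (counts : List (String × String × String × Int)) : Decidable (Pre_filter_universal counts) := by
  unfold Pre_filter_universal; infer_instance

def pvWitness_filter_universal : (List (String × String × String × Int)) :=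
  [("c1", "a1", "t1", 1), ("c1", "a2", "t1", 2), ("c1", "a2", "t2", 3), ("c2", "a1", "t1", -4)]

def Spec_filter_universal (counts : List (String × String × String × Int)) (out : List (String × String × String × Int)) : Prop := out = filter_universal_alt counts
instance (counts : List (String × String × String × Int)) (out : List (String × String × String × Int)) : Decidable (Spec_filter_universal counts out) := by unfold Spec_filter_universal; infer_instance

-- ===== CLAIM (what is proved, stated in full; the proofs are below) =====
def Claim_equal_filter_universal : Prop := ∀ (counts : List (String × String × String × Int)), Dom_filter_universal counts → Pre_filter_universal counts → Spec_filter_universal counts (filter_universal counts)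

-- ===== LEMMAS AND PROOFS =====

-- the two components of A's first loop, as single-dict folds
theorem pvBuildMaps_eq (counts : List (String × String × String × Int)) :
    pvBuildMaps counts =
      (counts.foldl (fun d r => d.modify r.1 [] (fun s => PySem.Set.add s r.2.1)) PySem.Dict.empty,
       counts.foldl (fun m r => m.modify r.1 PySem.Dict.empty
          (fun m2 => m2.modify r.2.2.1 [] (fun s => PySem.Set.add s r.2.1))) PySem.Dict.empty) := by
  unfold pvBuildMaps
  exact PySem.List.foldl_prod_mk
    (fun d (r : String × String × String × Int) => d.modify r.1 [] (fun s => PySem.Set.add s r.2.1))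
    (fun m (r : String × String × String × Int) => m.modify r.1 PySem.Dict.empty
        (fun m2 => m2.modify r.2.2.1 [] (fun s => PySem.Set.add s r.2.1)))
    counts PySem.Dict.empty PySem.Dict.empty

-- B's anchors loop computes the same dict as A's first component (insert of get-union = modify-add)
theorem pvAnchors_eq (counts : List (String × String × String × Int)) :
    pvAnchors counts = (pvBuildMaps counts).1 := by
  rw [pvBuildMaps_eq]; rfl

theorem mem_anchors (counts : List (String × String × String × Int)) (d : PySem.Dict String (PySem.Set String)) (cbc a : String) :
    a ∈ (counts.foldl (fun d r => d.modify r.1 [] (fun s => PySem.Set.add s r.2.1)) d).getD cbc []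
      ↔ a ∈ d.getD cbc [] ∨ ∃ r ∈ counts, r.1 = cbc ∧ r.2.1 = a := by
  induction counts generalizing d with
  | nil => simp
  | cons x t ih =>
    rw [List.foldl_cons, ih, PySem.Dict.getD_modify]
    by_cases h : cbc = x.1
    · rw [if_pos h]; subst h; simp [PySem.Set.mem_add]; tauto
    · rw [if_neg h]
      constructor
      · rintro (hd | ⟨r, hr, h1, h2⟩)
        · exact Or.inl hd
        · exact Or.inr ⟨r, List.mem_cons_of_mem _ hr, h1, h2⟩
      · rintro (hd | ⟨r, hr, h1, h2⟩)
        · exact Or.inl hd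
        · rcases List.mem_cons.1 hr with hr | hr
          · subst hr; exact absurd h1.symm h
          · exact Or.inr ⟨r, hr, h1, h2⟩

theorem nodup_anchors (counts : List (String × String × String × Int)) (d : PySem.Dict String (PySem.Set String)) (cbc : String)
    (hd : ∀ k, (d.getD k [] : PySem.Set String).Nodup) :
    ((counts.foldl (fun d r => d.modify r.1 [] (fun s => PySem.Set.add s r.2.1)) d).getD cbc []).Nodup := by
  induction counts generalizing d with
  | nil => exact hd cbc
  | cons x t ih =>
    refine ih _ (fun k => ?_)
    rw [PySem.Dict.getD_modify]
    split_ifs with h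
    · exact PySem.Set.nodup_add _ _ (hd _)
    · exact hd k

theorem mem_targ (counts : List (String × String × String × Int)) (m : PySem.Dict String (PySem.Dict String (PySem.Set String))) (cbc t a : String) :
    a ∈ ((counts.foldl (fun m r => m.modify r.1 PySem.Dict.empty
            (fun m2 => m2.modify r.2.2.1 [] (fun s => PySem.Set.add s r.2.1))) m).getD cbc PySem.Dict.empty).getD t []
      ↔ a ∈ (m.getD cbc PySem.Dict.empty).getD t [] ∨ ∃ r ∈ counts, r.1 = cbc ∧ r.2.1 = a ∧ r.2.2.1 = t := by
  induction counts generalizing m with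
  | nil => simp
  | cons x tl ih =>
    rw [List.foldl_cons, ih, PySem.Dict.getD_modify]
    by_cases h1 : cbc = x.1
    · rw [if_pos h1]; subst h1
      rw [PySem.Dict.getD_modify]
      by_cases h2 : t = x.2.2.1
      · rw [if_pos h2]; subst h2; simp [PySem.Set.mem_add]; tauto
      · rw [if_neg h2]
        constructor
        · rintro (hd | ⟨r, hr, e1, e2, e3⟩)
          · exact Or.inl hd
          · exact Or.inr ⟨r, List.mem_cons_of_mem _ hr, e1, e2, e3⟩
        · rintro (hd | ⟨r, hr, e1, e2, e3⟩)
          · exact Or.inl hd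
          · rcases List.mem_cons.1 hr with hr | hr
            · subst hr; exact absurd e3.symm h2
            · exact Or.inr ⟨r, hr, e1, e2, e3⟩
    · rw [if_neg h1]
      constructor
      · rintro (hd | ⟨r, hr, e1, e2, e3⟩)
        · exact Or.inl hd
        · exact Or.inr ⟨r, List.mem_cons_of_mem _ hr, e1, e2, e3⟩
      · rintro (hd | ⟨r, hr, e1, e2, e3⟩)
        · exact Or.inl hd
        · rcases List.mem_cons.1 hr with hr | hr
          · subst hr; exact absurd e1.symm h1
          · exact Or.inr ⟨r, hr, e1, e2, e3⟩

theorem nodup_targ (counts : List (String × String × String × Int)) (m : PySem.Dict String (PySem.Dict String (PySem.Set String))) (cbc t : String)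
    (hm : ∀ k k', ((m.getD k PySem.Dict.empty).getD k' [] : PySem.Set String).Nodup) :
    (((counts.foldl (fun m r => m.modify r.1 PySem.Dict.empty
        (fun m2 => m2.modify r.2.2.1 [] (fun s => PySem.Set.add s r.2.1))) m).getD cbc PySem.Dict.empty).getD t []).Nodup := by
  induction counts generalizing m with
  | nil => exact hm cbc t
  | cons x tl ih =>
    refine ih _ (fun k k' => ?_)
    rw [PySem.Dict.getD_modify]
    split_ifs with h
    · subst h
      rw [PySem.Dict.getD_modify]
      split_ifs with h'
      · exact PySem.Set.nodup_add _ _ (hm _ _)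
      · exact hm _ k'
    · exact hm k k'

-- A's size test "len(targ_anchors[cbc][target]) == n_anchors" says exactly: every anchor of cbc
-- occurs with this target in counts
theorem size_eq_iff (counts : List (String × String × String × Int)) (cbc t : String) :
    PySem.Set.len (((pvBuildMaps counts).2.getD cbc PySem.Dict.empty).getD t []) =
      PySem.Set.len ((pvBuildMaps counts).1.getD cbc [])
      ↔ ∀ a ∈ (pvBuildMaps counts).1.getD cbc [],
          ∃ r ∈ counts, r.1 = cbc ∧ r.2.1 = a ∧ r.2.2.1 = t := by
  rw [pvBuildMaps_eq]
  set S := (counts.foldl (fun d r => d.modify r.1 [] (fun s => PySem.Set.add s r.2.1)) PySem.Dict.empty).getD cbc [] with hS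
  set T := ((counts.foldl (fun m r => m.modify r.1 PySem.Dict.empty
      (fun m2 => m2.modify r.2.2.1 [] (fun s => PySem.Set.add s r.2.1))) PySem.Dict.empty).getD cbc PySem.Dict.empty).getD t [] with hT
  have hmemS : ∀ a, a ∈ S ↔ ∃ r ∈ counts, r.1 = cbc ∧ r.2.1 = a := by
    intro a; rw [hS, mem_anchors]; simp
  have hmemT : ∀ a, a ∈ T ↔ ∃ r ∈ counts, r.1 = cbc ∧ r.2.1 = a ∧ r.2.2.1 = t := by
    intro a; rw [hT, mem_targ]; simp
  have hsub : T ⊆ S := by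
    intro a ha
    rcases (hmemT a).1 ha with ⟨r, hr, e1, e2, _⟩
    exact (hmemS a).2 ⟨r, hr, e1, e2⟩
  have hndS : S.Nodup := nodup_anchors counts _ cbc (by simp)
  have hndT : T.Nodup := nodup_targ counts _ cbc t (by simp)
  have hlen : ∀ (l : PySem.Set String), PySem.Set.len l = (l.length : Int) := fun _ => rfl
  rw [hlen, hlen, Nat.cast_inj]
  constructor
  · intro hlen a haS
    have hperm : T.Perm S :=
      (List.Nodup.subperm hndT hsub).perm_of_length_le (le_of_eq hlen.symm)
    exact (hmemT a).1 (hperm.mem_iff.2 haS)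
  · intro hall
    have hsub2 : S ⊆ T := by
      intro a ha
      rcases hall a ha with ⟨r, hr, e1, e2, e3⟩
      exact (hmemT a).2 ⟨r, hr, e1, e2, e3⟩
    exact (List.perm_ext_iff_of_nodup hndT hndS).2 (fun a => ⟨fun h => hsub h, fun h => hsub2 h⟩) |>.length_eq

-- B's inner 'all/any' is that same statement
theorem any_iff (counts : List (String × String × String × Int)) (cbc a t : String) :
    (counts.any (fun q => (q.1, q.2.1, q.2.2.1) == (cbc, a, t))) = true
      ↔ ∃ r ∈ counts, r.1 = cbc ∧ r.2.1 = a ∧ r.2.2.1 = t := by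
  simp [List.any_eq_true, Prod.ext_iff]

-- ===== VERDICT (by name: the statement is the Claim_ definition above) =====
theorem filter_universal_spec : Claim_equal_filter_universal := by
  intro counts _hdom hpre
  unfold Spec_filter_universal filter_universal filter_universal_alt
  rw [pvAnchors_eq]
  dsimp only
  set st := pvBuildMaps counts with hst
  set p : (String × String × String × Int) → Bool := fun r =>
    !(decide (1 < PySem.Set.len (st.1.getD r.1 [])) &&
      (st.1.getD r.1 []).all (fun a =>
        counts.any (fun q => (q.1, q.2.1, q.2.2.1) == (r.1, a, r.2.2.1)))) with hp
  have hfun : (fun (acc : PySem.Dict (String × String × String) Int) (r : String × String × String × Int) =>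
        if 1 < PySem.Set.len (st.1.getD r.1 []) ∧
            PySem.Set.len ((st.2.getD r.1 PySem.Dict.empty).getD r.2.2.1 []) =
              PySem.Set.len (st.1.getD r.1 []) then acc
        else acc.insert (r.1, r.2.1, r.2.2.1) r.2.2.2)
      = (fun acc r => if p r then acc.insert (r.1, r.2.1, r.2.2.1) r.2.2.2 else acc) := by
    funext acc r
    have hlenN : ∀ (l : PySem.Set String), PySem.Set.len l = (l.length : Int) := fun _ => rfl
    have hsize := size_eq_iff counts r.1 r.2.2.1
    rw [← hst] at hsize
    by_cases h1 : 1 < PySem.Set.len (st.1.getD r.1 [])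
    · by_cases h2 : PySem.Set.len ((st.2.getD r.1 PySem.Dict.empty).getD r.2.2.1 []) =
          PySem.Set.len (st.1.getD r.1 [])
      · have hall : (st.1.getD r.1 []).all (fun a =>
            counts.any (fun q => (q.1, q.2.1, q.2.2.1) == (r.1, a, r.2.2.1))) = true := by
          rw [List.all_eq_true]
          intro a ha
          exact (any_iff counts r.1 a r.2.2.1).2 ((hsize.1 h2) a ha)
        have h1' : 1 < (st.1.getD r.1 []).length := by
          have := h1; rw [hlenN] at this; exact_mod_cast this
        rw [if_pos ⟨h1, h2⟩, hp]
        simp [hall, h1']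
      · have hall : (st.1.getD r.1 []).all (fun a =>
            counts.any (fun q => (q.1, q.2.1, q.2.2.1) == (r.1, a, r.2.2.1))) = false := by
          rw [Bool.eq_false_iff]
          intro hall
          apply h2
          rw [hsize]
          intro a ha
          exact (any_iff counts r.1 a r.2.2.1).1 ((List.all_eq_true.1 hall) a ha)
        rw [if_neg (fun hc => h2 hc.2), hp]
        simp [hall]
    · have h1' : ¬ 1 < (st.1.getD r.1 []).length := by
        intro hl; exact h1 (by rw [hlenN]; exact_mod_cast hl)
      rw [if_neg (fun hc => h1 hc.1), hp]
      simp [h1']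
  rw [hfun, ← List.foldl_filter]
  have hnd : ((counts.filter p).map (fun r => (r.1, r.2.1, r.2.2.1))).Nodup :=
    hpre.sublist (List.Sublist.map _ (List.filter_sublist (l := counts) (p := p)))
  rw [PySem.Dict.items_foldl_insert_fresh (counts.filter p)
      (fun r => (r.1, r.2.1, r.2.2.1)) (fun r => r.2.2.2) PySem.Dict.empty
      (fun a _ => PySem.Dict.contains_empty _) hnd]
  have hemp : (PySem.Dict.empty : PySem.Dict (String × String × String) Int).items = [] := rfl
  rw [hemp]
  simp only [List.nil_append, List.map_map]
  exact List.map_id _
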